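-- pv_equiv track=rewrite | github.com/ericmerle3789/Collatz-Junction-Theorem | syracuse_jepa/pipeline/paradigm5_self_referential.py | all_cyclic_shifts
-- ===== SOURCE A (Python) =====
-- def cyclic_shift_cumulative(sigma, S):
--     """
--     Given cumulative exponents σ = (0, σ_1, ..., σ_{k-1}) with individual
--     exponents e_i = σ_i - σ_{i-1} (and e_k = S - σ_{k-1}),
--     compute the cumulative sequence starting from n_1 instead of n_0.
--
--     If individual exponents are (e_1, e_2, ..., e_k), cycling gives
--     (e_2, e_3, ..., e_k, e_1). The new cumulative sequence is
--     (0, e_2, e_2+e_3, ..., e_2+...+e_k, S) but we need σ_{k-1} < S,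
--     so the new σ' = (0, e_2, e_2+e_3, ..., e_2+...+e_k).
--     """
--     k = len(sigma)
--     # Individual exponents
--     indiv = [sigma[i] - sigma[i-1] for i in range(1, k)]
--     indiv.append(S - sigma[-1])  # last individual exponent e_k
--
--     # Cyclic shift: (e_2, e_3, ..., e_k, e_1)
--     shifted_indiv = indiv[1:] + [indiv[0]]
--
--     # New cumulative sequence
--     new_sigma = [0]
--     cumsum = 0
--     for e in shifted_indiv[:-1]:  # k-1 cumulative positions
--         cumsum += e
--         new_sigma.append(cumsum)
--
--     return tuple(new_sigma)
--
-- def all_cyclic_shifts(sigma, S):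
--     """Generate all k cyclic shifts of a cumulative sequence."""
--     shifts = [sigma]
--     current = sigma
--     k = len(sigma)
--     for _ in range(k - 1):
--         current = cyclic_shift_cumulative(current, S)
--         shifts.append(current)
--     return shifts
-- ===== SOURCE B (Python) =====
-- def all_cyclic_shifts(sigma, S):
--     """Generate all k cyclic shifts of a cumulative sequence."""
--     k = len(sigma)
--     shifts = [sigma]
--     if k >= 2:
--         # exponent list of the cumulative sequence (0, sigma_1, ..., sigma_{k-1}, S)
--         ext = [0] + list(sigma[1:]) + [S]
--         f = [ext[i + 1] - ext[i] for i in range(k)]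
--         for j in range(1, k):
--             rot = f[j:] + f[:j]
--             cum = [0]
--             t = 0
--             for e in rot[:k - 1]:
--                 t += e
--                 cum.append(t)
--             shifts.append(tuple(cum))
--     return shifts
-- ===== Notes on version B (the rewrite author's own statement) =====
-- stated objective: alternative
-- what changed: Instead of iteratively re-differencing the previous shift k-1 times, B computes the exponent list of (0, sigma_1, ..., sigma_{k-1}, S) once and builds each shift directly as the prefix sums of an index rotation of that single list.
import Mathlib
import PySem

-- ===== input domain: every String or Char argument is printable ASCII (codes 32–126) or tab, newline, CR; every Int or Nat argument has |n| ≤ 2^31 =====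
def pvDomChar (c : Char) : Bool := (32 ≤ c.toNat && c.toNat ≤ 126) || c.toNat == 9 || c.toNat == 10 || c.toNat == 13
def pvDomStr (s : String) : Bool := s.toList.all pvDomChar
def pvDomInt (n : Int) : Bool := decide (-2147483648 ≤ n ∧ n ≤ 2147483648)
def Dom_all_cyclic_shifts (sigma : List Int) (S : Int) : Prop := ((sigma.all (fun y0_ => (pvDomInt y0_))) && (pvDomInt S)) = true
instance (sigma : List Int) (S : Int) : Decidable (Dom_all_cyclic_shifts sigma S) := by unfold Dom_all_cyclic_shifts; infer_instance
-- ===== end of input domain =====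

-- B replaces A's k-1 iterative re-differencing passes by one precomputed exponent
-- list whose index rotations are prefix-summed directly (objective: alternative).

-- ===== PORT A =====
-- helper of A; `sigma[-1]` / `indiv[0]` are ported with pyGetD: within all_cyclic_shifts
-- the helper is only reached with nonempty sigma, where Python raises nothing.
def cyclic_shift_cumulative (sigma : List Int) (S : Int) : List Int :=
  let k : Int := sigma.length
  -- indiv = [sigma[i] - sigma[i-1] for i in range(1, k)]
  let indiv := (PySem.List.pyRange 1 k 1).map
    (fun i => PySem.List.pyGetD sigma i 0 - PySem.List.pyGetD sigma (i - 1) 0)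
  -- indiv.append(S - sigma[-1])
  let indiv := indiv ++ [S - PySem.List.pyGetD sigma (-1) 0]
  -- shifted_indiv = indiv[1:] + [indiv[0]]
  let shifted := PySem.List.slice indiv (some 1) none ++ [PySem.List.pyGetD indiv 0 0]
  -- new_sigma = [0]; cumsum = 0; for e in shifted_indiv[:-1]: cumsum += e; new_sigma.append(cumsum)
  let st := (PySem.List.slice shifted none (some (-1))).foldl
    (fun (st : List Int × Int) e => (st.1 ++ [st.2 + e], st.2 + e)) ([0], 0)
  st.1

def all_cyclic_shifts (sigma : List Int) (S : Int) : List (List Int) :=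
  let k := sigma.length
  -- shifts = [sigma]; current = sigma; for _ in range(k-1): current = shift(current); append
  let st := (List.range (k - 1)).foldl
    (fun (st : List (List Int) × List Int) _ =>
      let c := cyclic_shift_cumulative st.2 S
      (st.1 ++ [c], c)) ([sigma], sigma)
  st.1

-- ===== PORT B =====
def all_cyclic_shifts_alt (sigma : List Int) (S : Int) : List (List Int) :=
  let k := sigma.length
  if 2 ≤ k then
    -- ext = [0] + list(sigma[1:]) + [S]
    let ext := 0 :: (sigma.drop 1 ++ [S])
    -- f = [ext[i+1] - ext[i] for i in range(k)]
    let f := (List.range k).map (fun i => ext.getD (i + 1) 0 - ext.getD i 0)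
    (List.range' 1 (k - 1)).foldl
      (fun acc j =>
        let rot := f.drop j ++ f.take j
        let cum := ((rot.take (k - 1)).foldl
          (fun (st : List Int × Int) e => (st.1 ++ [st.2 + e], st.2 + e)) ([0], 0)).1
        acc ++ [cum]) [sigma]
  else [sigma]

-- ===== PRECONDITION & SPEC =====
def Spec_all_cyclic_shifts (sigma : List Int) (S : Int) (out : List (List Int)) : Prop := out = all_cyclic_shifts_alt sigma S
instance (sigma : List Int) (S : Int) (out : List (List Int)) : Decidable (Spec_all_cyclic_shifts sigma S out) := by unfold Spec_all_cyclic_shifts; infer_instance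

-- ===== CLAIM (what is proved, stated in full; the proofs are below) =====
def Claim_equal_all_cyclic_shifts : Prop := ∀ (sigma : List Int) (S : Int), Dom_all_cyclic_shifts sigma S → Spec_all_cyclic_shifts sigma S (all_cyclic_shifts sigma S)

-- ===== LEMMAS AND PROOFS =====

-- running prefix sums starting from c
def cumFrom : Int → List Int → List Int
  | _, [] => []
  | c, e :: t => (c + e) :: cumFrom (c + e) t

-- adjacent differences
def adjDiffs : List Int → List Int
  | x :: y :: t => (y - x) :: adjDiffs (y :: t)
  | _ => []

-- closed form of the j-th cyclic shift (1 ≤ j ≤ k-1)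
def Cform (sigma : List Int) (S : Int) (j : Nat) : List Int :=
  let ext := 0 :: (sigma.drop 1 ++ [S])
  let ej := ext.getD j 0
  0 :: ((ext.drop (j + 1)).map (fun x => x - ej)
        ++ ((sigma.drop 1 ++ [S]).take (j - 1)).map (fun x => x + (S - ej)))


theorem cumFrom_foldl (l : List Int) (acc : List Int) (c : Int) :
    l.foldl (fun (st : List Int × Int) e => (st.1 ++ [st.2 + e], st.2 + e)) (acc, c)
      = (acc ++ cumFrom c l, c + l.sum) := by
  induction l generalizing acc c with
  | nil => simp [cumFrom]
  | cons e t ih => simp [cumFrom, ih]; ring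

theorem cumFrom_append (u v : List Int) (c : Int) :
    cumFrom c (u ++ v) = cumFrom c u ++ cumFrom (c + u.sum) v := by
  induction u generalizing c with
  | nil => simp [cumFrom]
  | cons e t ih => simp [cumFrom, ih, add_assoc]

theorem cumFrom_adjDiffs (l : List Int) (x c : Int) :
    cumFrom c (adjDiffs (x :: l)) = l.map (fun y => y - x + c) := by
  induction l generalizing x c with
  | nil => simp [adjDiffs, cumFrom]
  | cons y t ih =>
    simp only [adjDiffs, cumFrom, ih, List.map_cons]
    congr 1
    · ring
    · exact List.map_congr_left (fun z _ => by ring)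

theorem sum_adjDiffs (l : List Int) (x : Int) :
    (adjDiffs (x :: l)).sum = l.getLastD x - x := by
  induction l generalizing x with
  | nil => simp [adjDiffs]
  | cons y t ih =>
    simp [adjDiffs, ih]
    rcases t.eq_nil_or_concat with rfl | ⟨u, b, rfl⟩
    · simp
    · rw [List.concat_eq_append, ← List.cons_append, List.getLast?_concat, List.getLast?_concat]; rfl

theorem adjDiffs_length (l : List Int) : (adjDiffs l).length = l.length - 1 := by
  induction l with
  | nil => simp [adjDiffs]
  | cons x t ih =>
    cases t with
    | nil => simp [adjDiffs]
    | cons y u => simp [adjDiffs] at ih ⊢; omega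

theorem adjDiffs_getElem (l : List Int) (m : Nat) (h : m < l.length - 1) :
    (adjDiffs l)[m]'(by rw [adjDiffs_length]; exact h)
      = l[m + 1]'(by omega) - l[m]'(by omega) := by
  induction l generalizing m with
  | nil => simp at h
  | cons x t ih =>
    cases t with
    | nil => simp at h
    | cons y u =>
      cases m with
      | zero => simp [adjDiffs]
      | succ m =>
        simp only [adjDiffs, List.getElem_cons_succ]
        exact ih (m) (by simp at h ⊢; omega)

theorem adjDiffs_drop (j : Nat) (l : List Int) :
    (adjDiffs l).drop j = adjDiffs (l.drop j) := by
  induction j generalizing l with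
  | zero => simp
  | succ j ih =>
    cases l with
    | nil => simp [adjDiffs]
    | cons x t =>
      cases t with
      | nil => simp [adjDiffs]
      | cons y u => simpa [adjDiffs] using ih (y :: u)

theorem adjDiffs_take (j : Nat) (l : List Int) :
    (adjDiffs l).take j = adjDiffs (l.take (j + 1)) := by
  induction j generalizing l with
  | zero =>
    cases l with
    | nil => simp [adjDiffs]
    | cons x t => simp [adjDiffs]
  | succ j ih =>
    cases l with
    | nil => simp [adjDiffs]
    | cons x t =>
      cases t with
      | nil => simp [adjDiffs]
      | cons y u => simpa [adjDiffs] using ih (y :: u)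

theorem range_diffs (l : List Int) :
    (List.range (l.length - 1)).map (fun m => l.getD (m + 1) 0 - l.getD m 0) = adjDiffs l := by
  apply List.ext_getElem
  · simp [adjDiffs_length]
  · intro m h1 h2
    simp only [List.getElem_map, List.getElem_range]
    have hm : m < l.length - 1 := by simpa using h1
    rw [List.getD_eq_getElem l 0 (by omega), List.getD_eq_getElem l 0 (by omega),
      adjDiffs_getElem l m hm]

theorem getLastD_drop_concat (l : List Int) (j : Nat) (S d : Int) (h : j ≤ l.length) :
    ((l ++ [S]).drop j).getLastD d = S := by
  rw [List.drop_append_of_le_length h]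
  exact List.getLastD_concat

theorem indiv_eq (σ : List Int) :
    (PySem.List.pyRange 1 (σ.length : Int) 1).map
      (fun i => PySem.List.pyGetD σ i 0 - PySem.List.pyGetD σ (i - 1) 0) = adjDiffs σ := by
  rw [PySem.List.pyRange_one, List.map_map, ← range_diffs σ]
  have hlen : ((σ.length : Int) - 1).toNat = σ.length - 1 := by omega
  rw [hlen]
  apply List.map_congr_left
  intro m hm
  have h1 : (1 : Int) + (m : Int) = ((m + 1 : Nat) : Int) := by push_cast; ring
  simp only [Function.comp_apply]
  rw [h1, PySem.List.pyGetD_natCast]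
  have h2 : ((m + 1 : Nat) : Int) - 1 = ((m : Nat) : Int) := by push_cast; ring
  rw [h2, PySem.List.pyGetD_natCast]

theorem shift_closed (s0 s1 S : Int) (t : List Int) :
    cyclic_shift_cumulative (s0 :: s1 :: t) S = 0 :: (t ++ [S]).map (fun x => x - s1) := by
  unfold cyclic_shift_cumulative
  simp only [indiv_eq]
  have hne : (s0 :: s1 :: t : List Int) ≠ [] := by simp
  rw [PySem.List.pyGetD_neg_one _ _ hne]
  have hgl : (s0 :: s1 :: t).getLast hne = t.getLastD s1 := by
    rcases t.eq_nil_or_concat with rfl | ⟨u, b, rfl⟩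
    · simp
    · simp [List.concat_eq_append]
  rw [hgl]
  rw [PySem.List.slice_from_one, PySem.List.slice_to_neg_one]
  have hadj : adjDiffs (s0 :: s1 :: t) = (s1 - s0) :: adjDiffs (s1 :: t) := rfl
  rw [hadj]
  simp only [List.cons_append, List.tail_cons, List.dropLast_concat]
  rw [cumFrom_foldl]
  simp only [cumFrom_append, cumFrom_adjDiffs, sum_adjDiffs]
  simp only [cumFrom, List.map_append]
  simp

-- A's iteration
def iterShift (sigma : List Int) (S : Int) : Nat → List Int
  | 0 => sigma
  | j + 1 => cyclic_shift_cumulative (iterShift sigma S j) S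


theorem A_fold (σ : List Int) (S : Int) (m : Nat) :
    (List.range m).foldl (fun (st : List (List Int) × List Int) _ =>
        let c := cyclic_shift_cumulative st.2 S
        (st.1 ++ [c], c)) ([σ], σ)
      = (σ :: (List.range' 1 m).map (iterShift σ S), iterShift σ S m) := by
  induction m with
  | zero => simp [iterShift]
  | succ m ih =>
    rw [List.range_succ, List.foldl_append, ih, List.range'_1_concat]
    simp [iterShift, Nat.add_comm]

theorem B_fold (k : Nat) (f : List Int) (L : List Nat) (init : List (List Int)) :
    L.foldl (fun acc j =>
      let rot := f.drop j ++ f.take j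
      let cum := ((rot.take (k - 1)).foldl
        (fun (st : List Int × Int) e => (st.1 ++ [st.2 + e], st.2 + e)) ([0], 0)).1
      acc ++ [cum]) init
    = init ++ L.map (fun j => (((f.drop j ++ f.take j).take (k - 1)).foldl
        (fun (st : List Int × Int) e => (st.1 ++ [st.2 + e], st.2 + e)) ([0], 0)).1) := by
  induction L generalizing init with
  | nil => simp
  | cons j L ih => simp [ih]

theorem bstep_eq (σ : List Int) (S : Int) (j : Nat) (hσ : σ ≠ []) (hj1 : 1 ≤ j)
    (hjk : j ≤ σ.length - 1) :
    (((((List.range σ.length).map (fun i => (0 :: (σ.drop 1 ++ [S])).getD (i + 1) 0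
        - (0 :: (σ.drop 1 ++ [S])).getD i 0)).drop j
      ++ ((List.range σ.length).map (fun i => (0 :: (σ.drop 1 ++ [S])).getD (i + 1) 0
        - (0 :: (σ.drop 1 ++ [S])).getD i 0)).take j).take (σ.length - 1)).foldl
      (fun (st : List Int × Int) e => (st.1 ++ [st.2 + e], st.2 + e)) ([0], 0)).1
    = Cform σ S j := by
  have hσ1 : 1 ≤ σ.length := List.length_pos_iff.mpr hσ
  set k := σ.length with hk
  set ext : List Int := 0 :: (σ.drop 1 ++ [S]) with hext
  have hextlen : ext.length = k + 1 := by
    simp [hext]; omega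
  have hf : (List.range k).map (fun i => ext.getD (i + 1) 0 - ext.getD i 0) = adjDiffs ext := by
    have h1 : k = ext.length - 1 := by omega
    rw [h1, range_diffs]
  rw [hf]
  have hflen : (adjDiffs ext).length = k := by rw [adjDiffs_length]; omega
  rw [List.take_append]
  have hd1 : ((adjDiffs ext).drop j).take (k - 1) = (adjDiffs ext).drop j :=
    List.take_of_length_le (by simp [hflen]; omega)
  have hd2 : (k - 1) - ((adjDiffs ext).drop j).length = j - 1 := by simp [hflen]; omega
  rw [hd1, hd2, List.take_take]
  have hmin : min (j - 1) j = j - 1 := by omega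
  rw [hmin, adjDiffs_drop, adjDiffs_take]
  have hj' : (j - 1) + 1 = j := by omega
  rw [hj', cumFrom_foldl]
  have hjlt : j < ext.length := by omega
  rw [List.drop_eq_getElem_cons hjlt, cumFrom_append, cumFrom_adjDiffs, sum_adjDiffs]
  have hsplit : ext = (0 :: σ.drop 1) ++ [S] := by simp [hext]
  have hgl : ∀ d : Int, (ext.drop (j + 1)).getLastD d = S := by
    intro d
    conv_lhs => rw [hsplit]
    exact getLastD_drop_concat (0 :: σ.drop 1) (j + 1) S d (by simp; omega)
  rw [hgl]
  have htake : ext.take j = 0 :: (σ.drop 1 ++ [S]).take (j - 1) := by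
    rw [hext, ← hj']
    simp
  rw [htake, cumFrom_adjDiffs]
  have hej : ext.getD j 0 = ext[j] := List.getD_eq_getElem _ _ hjlt
  simp only [Cform, ← hext, hej]
  simp

theorem iter_eq (s0 s1 S : Int) (t : List Int) :
    ∀ (j : Nat), 1 ≤ j → j ≤ (s0 :: s1 :: t).length - 1 →
    iterShift (s0 :: s1 :: t) S j = Cform (s0 :: s1 :: t) S j := by
  intro j hj1
  induction j, hj1 using Nat.le_induction with
  | base =>
    intro _
    show cyclic_shift_cumulative (s0 :: s1 :: t) S = _
    rw [shift_closed]
    simp [Cform]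
  | succ j hj1 ih =>
    intro hjk
    have hihv := ih (by simp at hjk ⊢; omega)
    show cyclic_shift_cumulative (iterShift (s0 :: s1 :: t) S j) S = _
    rw [hihv]
    set σ : List Int := s0 :: s1 :: t with hσ
    set ext : List Int := 0 :: (σ.drop 1 ++ [S]) with hext
    have hextlen : ext.length = σ.length + 1 := by simp [hext, hσ]
    have hklen : σ.length = t.length + 2 := by simp [hσ]
    have hjk' : j + 1 ≤ σ.length - 1 := by simpa [hklen] using hjk
    have hdrop : ext.drop (j + 1) = ext[j + 1] :: ext.drop (j + 2) :=
      List.drop_eq_getElem_cons (by omega)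
    simp only [Cform, ← hext]
    rw [hdrop]
    simp only [List.map_cons, List.cons_append]
    rw [shift_closed]
    -- right side: take (j+1-1) = take ((j-1)+1) = take (j-1) ++ [elem]
    have hj' : (j + 1) - 1 = (j - 1) + 1 := by omega
    have hRlen : (σ.drop 1 ++ [S]).length = σ.length := by simp [hσ]
    have hjR : j - 1 < (σ.drop 1 ++ [S]).length := by omega
    rw [hj', ← List.take_append_getElem hjR]
    have hgetR : (σ.drop 1 ++ [S])[j - 1]'hjR = ext.getD j 0 := by
      have h1 : ext.getD j 0 = (σ.drop 1 ++ [S]).getD (j - 1) 0 := by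
        conv_lhs => rw [hext, show j = (j - 1) + 1 from by omega]
        rw [List.getD_cons_succ]
      rw [h1, List.getD_eq_getElem _ _ hjR]
    have hej1 : ext.getD (j + 1) 0 = ext[j + 1]'(by omega) :=
      List.getD_eq_getElem _ _ (by omega)
    rw [hgetR, hej1]
    simp only [List.map_append, List.map_map, List.map_cons, List.map_nil]
    have hlast : S - (ext[j + 1] - ext.getD j 0) = ext.getD j 0 + (S - ext[j + 1]) := by ring
    have hm1 : List.map ((fun x => x - (ext[j + 1] - ext.getD j 0)) ∘ fun x => x - ext.getD j 0)
        (List.drop (j + 2) ext)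
        = List.map (fun x => x - ext[j + 1]) (List.drop (j + 2) ext) :=
      List.map_congr_left (fun z _ => by simp only [Function.comp_apply]; ring)
    have hm2 : List.map ((fun x => x - (ext[j + 1] - ext.getD j 0)) ∘ fun x => x + (S - ext.getD j 0))
        (List.take (j - 1) (List.drop 1 σ ++ [S]))
        = List.map (fun x => x + (S - ext[j + 1])) (List.take (j - 1) (List.drop 1 σ ++ [S])) :=
      List.map_congr_left (fun z _ => by simp only [Function.comp_apply]; ring)
    rw [List.append_assoc, hm1, hm2, hlast]


theorem all_cyclic_shifts_spec : Claim_equal_all_cyclic_shifts := by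
  intro sigma S _
  unfold Spec_all_cyclic_shifts
  by_cases hk : 2 ≤ sigma.length
  · rcases sigma with _ | ⟨s0, _ | ⟨s1, t⟩⟩
    · simp at hk
    · simp at hk
    · unfold all_cyclic_shifts all_cyclic_shifts_alt
      rw [if_pos hk]
      have hA := congrArg Prod.fst (A_fold (s0 :: s1 :: t) S ((s0 :: s1 :: t).length - 1))
      have hB := B_fold (s0 :: s1 :: t).length
        ((List.range (s0 :: s1 :: t).length).map
          (fun i => (0 :: ((s0 :: s1 :: t).drop 1 ++ [S])).getD (i + 1) 0
            - (0 :: ((s0 :: s1 :: t).drop 1 ++ [S])).getD i 0))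
        (List.range' 1 ((s0 :: s1 :: t).length - 1)) [s0 :: s1 :: t]
      have hmap : (List.range' 1 ((s0 :: s1 :: t).length - 1)).map (iterShift (s0 :: s1 :: t) S)
          = (List.range' 1 ((s0 :: s1 :: t).length - 1)).map
            (fun j => (((((List.range (s0 :: s1 :: t).length).map
                (fun i => (0 :: ((s0 :: s1 :: t).drop 1 ++ [S])).getD (i + 1) 0
                  - (0 :: ((s0 :: s1 :: t).drop 1 ++ [S])).getD i 0)).drop j
              ++ ((List.range (s0 :: s1 :: t).length).map
                (fun i => (0 :: ((s0 :: s1 :: t).drop 1 ++ [S])).getD (i + 1) 0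
                  - (0 :: ((s0 :: s1 :: t).drop 1 ++ [S])).getD i 0)).take j).take
                ((s0 :: s1 :: t).length - 1)).foldl
              (fun (st : List Int × Int) e => (st.1 ++ [st.2 + e], st.2 + e)) ([0], 0)).1) := by
        apply List.map_congr_left
        intro j hj
        rw [List.mem_range'_1] at hj
        have hlen : (s0 :: s1 :: t).length = t.length + 2 := by simp
        rw [iter_eq s0 s1 S t j hj.1 (by omega)]
        exact (bstep_eq (s0 :: s1 :: t) S j (by simp) hj.1 (by omega)).symm
      exact hA.trans ((congrArg (List.cons (s0 :: s1 :: t)) hmap).trans hB.symm)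
  · have h0 : sigma.length - 1 = 0 := by omega
    simp [all_cyclic_shifts, all_cyclic_shifts_alt, hk, h0]
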